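-- pv_equiv track=rewrite | github.com/Ram-Koneti/Striver-A2Z-DSA | Arrays/Medium/Set_Matrix_Zeroes.py | set_matrix_zeroes
-- ===== SOURCE A (Python) =====
-- def set_matrix_zeroes(matrix):
--     m, n = len(matrix), len(matrix[0])
--
--     first_row_zero = any(matrix[0][j] == 0 for j in range(n))
--     first_col_zero = any(matrix[i][0] == 0 for i in range(m))
--
--     # mark rows and columns
--     for i in range(1, m):
--         for j in range(1, n):
--             if matrix[i][j] == 0:
--                 matrix[i][0] = 0
--                 matrix[0][j] = 0
--
--     # set zeroes based on marks
--     for i in range(1, m):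
--         if matrix[i][0] == 0:
--             for j in range(n):
--                 matrix[i][j] = 0
--
--     for j in range(1, n):
--         if matrix[0][j] == 0:
--             for i in range(m):
--                 matrix[i][j] = 0
--
--     # handle first row
--     if first_row_zero:
--         for j in range(n):
--             matrix[0][j] = 0
--
--     # handle first column
--     if first_col_zero:
--         for i in range(m):
--             matrix[i][0] = 0
--
--     return matrix
-- ===== SOURCE B (Python) =====
-- def set_matrix_zeroes(matrix):
--     n = len(matrix[0])
--     zero_rows = {i for i, row in enumerate(matrix) if 0 in row[:n]}
--     zero_cols = {j for j in range(n) if any(row[j] == 0 for row in matrix)}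
--     for i, row in enumerate(matrix):
--         for j in range(n):
--             if i in zero_rows or j in zero_cols:
--                 row[j] = 0
--     return matrix
-- ===== Notes on version B (the rewrite author's own statement) =====
-- stated objective: simpler
-- what changed: B drops A's first-row/first-column in-place marker trick and instead builds two explicit index sets (rows and columns containing a zero) in one scan, then zeroes every cell whose row or column index is in a set.
import Mathlib
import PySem

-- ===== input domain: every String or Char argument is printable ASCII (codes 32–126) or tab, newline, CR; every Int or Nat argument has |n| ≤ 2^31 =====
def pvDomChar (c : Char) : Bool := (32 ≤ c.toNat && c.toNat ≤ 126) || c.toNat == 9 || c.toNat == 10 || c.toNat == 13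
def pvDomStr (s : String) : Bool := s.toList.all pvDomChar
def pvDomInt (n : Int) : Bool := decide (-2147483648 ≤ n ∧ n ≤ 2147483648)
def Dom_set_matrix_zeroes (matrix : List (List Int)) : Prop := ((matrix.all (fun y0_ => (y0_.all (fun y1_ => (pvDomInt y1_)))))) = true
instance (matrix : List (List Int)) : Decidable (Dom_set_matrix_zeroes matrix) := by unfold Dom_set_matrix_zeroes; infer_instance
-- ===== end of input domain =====

-- B replaces A's first-row/first-column marker trick by two explicit index sets of zero rows/columns
-- (objective: simpler); both Pythons mutate and return the argument matrix — the equivalence proved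
-- here is about the returned value.


-- ===== PORT A =====
-- matrix[i][j] read / matrix[i][j] = 0 write, hand-ported with Nat indices (all Python indices here
-- come from range(...) so they are nonnegative); the getD defaults are never read on inputs
-- satisfying Pre_ (every index is in range there; out of range Python raises IndexError).
def mget (M : List (List Int)) (i j : Nat) : Int := (M.getD i []).getD j 0
def msetz (M : List (List Int)) (i j : Nat) : List (List Int) := M.set i ((M.getD i []).set j 0)

def set_matrix_zeroes (matrix : List (List Int)) : List (List Int) :=
  let m := matrix.length
  let n := (matrix.getD 0 []).length
  let firstRowZero := (List.range n).any (fun j => mget matrix 0 j == 0)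
  let firstColZero := (List.range m).any (fun i => mget matrix i 0 == 0)
  -- mark rows and columns: for i in range(1, m): for j in range(1, n): …
  let M1 := (List.range' 1 (m - 1)).foldl (fun M i =>
      (List.range' 1 (n - 1)).foldl (fun M j =>
        if mget M i j == 0 then msetz (msetz M i 0) 0 j else M) M) matrix
  -- set zeroes based on marks
  let M2 := (List.range' 1 (m - 1)).foldl (fun M i =>
      if mget M i 0 == 0 then (List.range n).foldl (fun M j => msetz M i j) M else M) M1
  let M3 := (List.range' 1 (n - 1)).foldl (fun M j =>
      if mget M 0 j == 0 then (List.range m).foldl (fun M i => msetz M i j) M else M) M2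
  -- handle first row / first column
  let M4 := if firstRowZero then (List.range n).foldl (fun M j => msetz M 0 j) M3 else M3
  if firstColZero then (List.range m).foldl (fun M i => msetz M i 0) M4 else M4

-- ===== PORT B =====
-- row[:n] is List.take n (n = len(matrix[0]) ≥ 0, so the slice is exactly take); the set
-- comprehensions become PySem.Set.ofList of the filtered index lists; row[j] reads use getD,
-- never out of range under Pre_.
def set_matrix_zeroes_alt (matrix : List (List Int)) : List (List Int) :=
  let n := (matrix.getD 0 []).length
  let zeroRows : PySem.Set Int :=
    PySem.Set.ofList (((PySem.List.enumerate matrix 0).filter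
      (fun p => (p.2.take n).contains 0)).map Prod.fst)
  let zeroCols : PySem.Set Int :=
    PySem.Set.ofList (((List.range n).filter
      (fun j => matrix.any (fun row => row.getD j 0 == 0))).map (fun (j : Nat) => (j : Int)))
  (PySem.List.enumerate matrix 0).map (fun p =>
    (List.range n).foldl (fun row (j : Nat) =>
      if zeroRows.contains p.1 || zeroCols.contains (j : Int) then row.set j 0 else row) p.2)

-- ===== PRECONDITION & SPEC =====
-- Pre_ excludes exactly the inputs on which A raises IndexError: the empty matrix / empty first
-- row (matrix[0][…] or matrix[i][0]) and matrices with a row shorter than the first row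
-- (matrix[i][j] for j < len(matrix[0])).
def Pre_set_matrix_zeroes (matrix : List (List Int)) : Prop :=
  matrix ≠ [] ∧ 0 < (matrix.getD 0 []).length ∧
    ∀ row ∈ matrix, (matrix.getD 0 []).length ≤ row.length
instance (matrix : List (List Int)) : Decidable (Pre_set_matrix_zeroes matrix) := by
  unfold Pre_set_matrix_zeroes; infer_instance
def pvWitness_set_matrix_zeroes : List (List Int) := [[1, 0, 3], [4, 5, 6], [0, 8, 9]]

def Spec_set_matrix_zeroes (matrix : List (List Int)) (out : List (List Int)) : Prop := out = set_matrix_zeroes_alt matrix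
instance (matrix : List (List Int)) (out : List (List Int)) : Decidable (Spec_set_matrix_zeroes matrix out) := by unfold Spec_set_matrix_zeroes; infer_instance

-- ===== CLAIM (what is proved, stated in full; the proofs are below) =====
def Claim_equal_set_matrix_zeroes : Prop := ∀ (matrix : List (List Int)), Dom_set_matrix_zeroes matrix → Pre_set_matrix_zeroes matrix → Spec_set_matrix_zeroes matrix (set_matrix_zeroes matrix)

-- ===== LEMMAS AND PROOFS =====

def shapeEq (A B : List (List Int)) : Prop :=
  A.length = B.length ∧ ∀ i, (A.getD i []).length = (B.getD i []).length

lemma getD_set_list (M : List (List Int)) (a i : Nat) (r : List Int) :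
    (M.set a r).getD i [] = if i = a ∧ a < M.length then r else M.getD i [] := by
  simp only [List.getD_eq_getElem?_getD, List.getElem?_set]
  split_ifs with h1 h2 h3 <;> simp_all

lemma getD_set_int (r : List Int) (b j : Nat) (v : Int) :
    (r.set b v).getD j 0 = if j = b ∧ b < r.length then v else r.getD j 0 := by
  simp only [List.getD_eq_getElem?_getD, List.getElem?_set]
  split_ifs with h1 h2 h3 <;> simp_all

lemma shapeEq_msetz (M : List (List Int)) (a b : Nat) : shapeEq (msetz M a b) M := by
  unfold shapeEq msetz
  refine ⟨by simp, fun i => ?_⟩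
  rw [getD_set_list]
  split_ifs with h
  · simp [h.1]
  · rfl

lemma mget_msetz (M : List (List Int)) (a b i j : Nat) :
    mget (msetz M a b) i j =
      if i = a ∧ j = b ∧ a < M.length ∧ b < (M.getD a []).length then 0 else mget M i j := by
  unfold mget msetz
  rw [getD_set_list]
  split_ifs with h1 h2 h3
  · rw [getD_set_int]; simp_all
  · rw [getD_set_int]; simp_all
  · exact absurd h3 (by tauto)
  · rfl

lemma shapeEq_refl (A : List (List Int)) : shapeEq A A := ⟨rfl, fun _ => rfl⟩
lemma shapeEq_trans {A B C : List (List Int)} (h1 : shapeEq A B) (h2 : shapeEq B C) :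
    shapeEq A C := ⟨h1.1.trans h2.1, fun i => (h1.2 i).trans (h2.2 i)⟩

lemma mget_foldl_msetz (ps : List (Nat × Nat)) (M : List (List Int))
    (h : ∀ p ∈ ps, p.1 < M.length ∧ p.2 < (M.getD p.1 []).length) (a b : Nat) :
    mget (ps.foldl (fun M p => msetz M p.1 p.2) M) a b =
      if (a, b) ∈ ps then 0 else mget M a b := by
  induction ps generalizing M with
  | nil => simp
  | cons p ps ih =>
    have hsh := shapeEq_msetz M p.1 p.2
    rw [List.foldl_cons, ih _ (fun q hq => by
      rw [hsh.1, hsh.2]; exact h q (List.mem_cons_of_mem _ hq))]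
    rw [mget_msetz]
    have hp := h p List.mem_cons_self
    by_cases hmem : (a, b) ∈ ps
    · rw [if_pos hmem, if_pos (List.mem_cons_of_mem _ hmem)]
    · rw [if_neg hmem]
      by_cases hab : (a, b) = p
      · have ha : a = p.1 := congrArg Prod.fst hab
        have hb : b = p.2 := congrArg Prod.snd hab
        rw [if_pos ⟨ha, hb, hp.1, hp.2⟩, if_pos (by simp [List.mem_cons, hab])]
      · have hno : ¬(a = p.1 ∧ b = p.2 ∧ p.1 < M.length ∧ p.2 < (M.getD p.1 []).length) := by
          intro hh; exact hab (by rw [Prod.ext_iff]; exact ⟨hh.1, hh.2.1⟩)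
        rw [if_neg hno, if_neg (by simp [List.mem_cons, hmem, hab])]

lemma getD_foldl_set_if (L : List Nat) (c : Nat → Bool) (row : List Int) (b : Nat) :
    (L.foldl (fun r j => if c j then r.set j 0 else r) row).getD b 0 =
      if b ∈ L ∧ c b = true ∧ b < row.length then 0 else row.getD b 0 := by
  induction L generalizing row with
  | nil => simp
  | cons j L ih =>
    rw [List.foldl_cons, ih]
    by_cases hcj : c j = true
    · rw [if_pos hcj]
      by_cases hb : b ∈ L ∧ c b = true ∧ b < row.length
      · rw [if_pos (by simpa [List.length_set] using hb),
          if_pos ⟨List.mem_cons_of_mem _ hb.1, hb.2⟩]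
      · rw [if_neg (by simpa [List.length_set] using hb), getD_set_int]
        by_cases hbj : b = j ∧ j < row.length
        · rw [if_pos hbj, if_pos ⟨by simp [hbj.1], by rw [hbj.1]; exact hcj, hbj.1 ▸ hbj.2⟩]
        · rw [if_neg hbj, if_neg (by
            intro hh
            rcases List.mem_cons.mp hh.1 with h1 | h1
            · exact hbj ⟨h1, h1 ▸ hh.2.2⟩
            · exact hb ⟨h1, hh.2⟩)]
    · rw [if_neg hcj]
      by_cases hb : b ∈ L ∧ c b = true ∧ b < row.length
      · rw [if_pos hb, if_pos ⟨List.mem_cons_of_mem _ hb.1, hb.2⟩]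
      · rw [if_neg hb, if_neg (by
          intro hh
          rcases List.mem_cons.mp hh.1 with h1 | h1
          · exact hcj (h1 ▸ hh.2.1)
          · exact hb ⟨h1, hh.2⟩)]

lemma shapeEq_foldl {α : Type} (l : List α) (f : List (List Int) → α → List (List Int))
    (h : ∀ M x, shapeEq (f M x) M) (M : List (List Int)) :
    shapeEq (l.foldl f M) M := by
  induction l generalizing M with
  | nil => exact shapeEq_refl M
  | cons x l ih => exact shapeEq_trans (ih (f M x)) (h M x)

lemma mem_ps_row (i n a b : Nat) :
    (a, b) ∈ (List.range n).map (Prod.mk i) ↔ a = i ∧ b < n := by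
  simp [List.mem_map, Prod.ext_iff, eq_comm, and_comm]

lemma phase2_fold (n : Nat) (L : List Nat) (M : List (List Int))
    (hL : ∀ i ∈ L, i < M.length) (hrow : ∀ i ∈ L, n ≤ (M.getD i []).length) (a b : Nat) :
    mget (L.foldl (fun M i =>
        if mget M i 0 == 0 then (List.range n).foldl (fun M j => msetz M i j) M else M) M) a b =
      if a ∈ L ∧ mget M a 0 = 0 ∧ b < n then 0 else mget M a b := by
  induction L generalizing M with
  | nil => simp
  | cons i L ih =>
    rw [List.foldl_cons]
    have hiM := hL i List.mem_cons_self
    have hin := hrow i List.mem_cons_self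
    -- the inner zero-row fold, rewritten via mget_foldl_msetz
    have hinner : ∀ a b, mget ((List.range n).foldl (fun M j => msetz M i j) M) a b =
        if a = i ∧ b < n then 0 else mget M a b := by
      intro a b
      have : (List.range n).foldl (fun M j => msetz M i j) M =
          ((List.range n).map (Prod.mk i)).foldl (fun M p => msetz M p.1 p.2) M := by
        rw [List.foldl_map]
      rw [this, mget_foldl_msetz _ _ (by
        intro p hp
        rcases List.mem_map.mp hp with ⟨j, hj, rfl⟩
        exact ⟨hiM, lt_of_lt_of_le (List.mem_range.mp hj) hin⟩)]
      simp only [mem_ps_row]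
    set M' := if mget M i 0 == 0 then (List.range n).foldl (fun M j => msetz M i j) M else M with hM'
    have hsh : shapeEq M' M := by
      rw [hM']; split
      · exact shapeEq_foldl _ _ (fun M j => shapeEq_msetz M i j) M
      · exact shapeEq_refl M
    have hmark : ∀ a, mget M' a 0 = mget M a 0 := by
      intro a
      rw [hM']; split
      · rename_i hcond
        rw [hinner]
        split
        · rename_i hcc
          rw [hcc.1, (beq_iff_eq).mp hcond]
        · rfl
      · rfl
    rw [ih M' (fun x hx => hsh.1 ▸ hL x (List.mem_cons_of_mem _ hx))
      (fun x hx => hsh.2 x ▸ hrow x (List.mem_cons_of_mem _ hx))]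
    by_cases hcond : mget M i 0 = 0
    · have hMZ : M' = (List.range n).foldl (fun M j => msetz M i j) M := by
        rw [hM', if_pos (beq_iff_eq.mpr hcond)]
      by_cases hc1 : a ∈ L ∧ mget M a 0 = 0 ∧ b < n
      · rw [if_pos (by rw [hmark a]; exact hc1),
          if_pos ⟨List.mem_cons_of_mem _ hc1.1, hc1.2⟩]
      · rw [if_neg (by rw [hmark a]; exact hc1), hMZ, hinner]
        by_cases hc2 : a = i ∧ b < n
        · rw [if_pos hc2, if_pos ⟨List.mem_cons.mpr (Or.inl hc2.1), hc2.1 ▸ hcond, hc2.2⟩]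
        · rw [if_neg hc2, if_neg (by
            intro hh
            rcases List.mem_cons.mp hh.1 with h1 | h1
            · exact hc2 ⟨h1, hh.2.2⟩
            · exact hc1 ⟨h1, hh.2⟩)]
    · have hMM : M' = M := by rw [hM', if_neg (by simpa using hcond)]
      rw [hMM]
      by_cases hc1 : a ∈ L ∧ mget M a 0 = 0 ∧ b < n
      · rw [if_pos hc1, if_pos ⟨List.mem_cons_of_mem _ hc1.1, hc1.2⟩]
      · rw [if_neg hc1, if_neg (by
          intro hh
          rcases List.mem_cons.mp hh.1 with h1 | h1
          · exact hcond (h1 ▸ hh.2.1)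
          · exact hc1 ⟨h1, hh.2⟩)]

lemma mem_ps_col (j m a b : Nat) :
    (a, b) ∈ (List.range m).map (fun i => (i, j)) ↔ b = j ∧ a < m := by
  simp [List.mem_map, Prod.ext_iff, eq_comm, and_comm]

lemma phase3_fold (m : Nat) (L : List Nat) (M : List (List Int))
    (hm : m = M.length)
    (hL : ∀ j ∈ L, ∀ i, i < M.length → j < (M.getD i []).length) (a b : Nat) :
    mget (L.foldl (fun M j =>
        if mget M 0 j == 0 then (List.range m).foldl (fun M i => msetz M i j) M else M) M) a b =
      if b ∈ L ∧ mget M 0 b = 0 ∧ a < m then 0 else mget M a b := by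
  induction L generalizing M with
  | nil => simp
  | cons j L ih =>
    rw [List.foldl_cons]
    have hjL := hL j List.mem_cons_self
    have hinner : ∀ a b, mget ((List.range m).foldl (fun M i => msetz M i j) M) a b =
        if b = j ∧ a < m then 0 else mget M a b := by
      intro a b
      have : (List.range m).foldl (fun M i => msetz M i j) M =
          ((List.range m).map (fun i => (i, j))).foldl (fun M p => msetz M p.1 p.2) M := by
        rw [List.foldl_map]
      rw [this, mget_foldl_msetz _ _ (by
        intro p hp
        rcases List.mem_map.mp hp with ⟨i, hi, rfl⟩
        have him : i < M.length := hm ▸ List.mem_range.mp hi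
        exact ⟨him, hjL i him⟩)]
      simp only [mem_ps_col]
    set M' := if mget M 0 j == 0 then (List.range m).foldl (fun M i => msetz M i j) M else M with hM'
    have hsh : shapeEq M' M := by
      rw [hM']; split
      · exact shapeEq_foldl _ _ (fun M i => shapeEq_msetz M i j) M
      · exact shapeEq_refl M
    have hmark : ∀ b, mget M' 0 b = mget M 0 b := by
      intro b
      rw [hM']; split
      · rename_i hcond
        rw [hinner]
        split
        · rename_i hcc
          rw [hcc.1, (beq_iff_eq).mp hcond]
        · rfl
      · rfl
    rw [ih M' (hm.trans hsh.1.symm) (fun x hx i hi => hsh.2 i ▸ hL x (List.mem_cons_of_mem _ hx) i (hsh.1 ▸ hi))]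
    by_cases hcond : mget M 0 j = 0
    · have hMZ : M' = (List.range m).foldl (fun M i => msetz M i j) M := by
        rw [hM', if_pos (beq_iff_eq.mpr hcond)]
      by_cases hc1 : b ∈ L ∧ mget M 0 b = 0 ∧ a < m
      · rw [if_pos (by rw [hmark b]; exact hc1),
          if_pos ⟨List.mem_cons_of_mem _ hc1.1, hc1.2⟩]
      · rw [if_neg (by rw [hmark b]; exact hc1), hMZ, hinner]
        by_cases hc2 : b = j ∧ a < m
        · rw [if_pos hc2, if_pos ⟨List.mem_cons.mpr (Or.inl hc2.1), hc2.1 ▸ hcond, hc2.2⟩]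
        · rw [if_neg hc2, if_neg (by
            intro hh
            rcases List.mem_cons.mp hh.1 with h1 | h1
            · exact hc2 ⟨h1, hh.2.2⟩
            · exact hc1 ⟨h1, hh.2⟩)]
    · have hMM : M' = M := by rw [hM', if_neg (by simpa using hcond)]
      rw [hMM]
      by_cases hc1 : b ∈ L ∧ mget M 0 b = 0 ∧ a < m
      · rw [if_pos hc1, if_pos ⟨List.mem_cons_of_mem _ hc1.1, hc1.2⟩]
      · rw [if_neg hc1, if_neg (by
          intro hh
          rcases List.mem_cons.mp hh.1 with h1 | h1
          · exact hcond (h1 ▸ hh.2.1)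
          · exact hc1 ⟨h1, hh.2⟩)]

lemma phase1_row (M0 : List (List Int)) (i : Nat) (LJ : List Nat) (M : List (List Int))
    (hsh : shapeEq M M0) (hi : 1 ≤ i) (him : i < M0.length) (h0 : 0 < M0.length)
    (hri : 0 < (M0.getD i []).length)
    (hLJ : ∀ j ∈ LJ, 1 ≤ j ∧ j < (M0.getD 0 []).length)
    (hint : ∀ a b, 1 ≤ a → 1 ≤ b → mget M a b = mget M0 a b) (a b : Nat) :
    mget (LJ.foldl (fun M j => if mget M i j == 0 then msetz (msetz M i 0) 0 j else M) M) a b =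
      if a = i ∧ b = 0 ∧ ∃ j ∈ LJ, mget M0 i j = 0 then 0
      else if a = 0 ∧ b ∈ LJ ∧ mget M0 i b = 0 then 0
      else mget M a b := by
  induction LJ generalizing M with
  | nil => simp
  | cons j LJ ih =>
    rw [List.foldl_cons]
    obtain ⟨hj1, hjn⟩ := hLJ j List.mem_cons_self
    have hcondM : (mget M i j == 0) = true ↔ mget M0 i j = 0 := by
      rw [hint i j hi hj1]; exact beq_iff_eq
    set M' := if mget M i j == 0 then msetz (msetz M i 0) 0 j else M with hM'
    have hsh' : shapeEq M' M := by
      rw [hM']; split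
      · exact shapeEq_trans (shapeEq_msetz _ 0 j) (shapeEq_msetz M i 0)
      · exact shapeEq_refl M
    have hM'val : mget M0 i j = 0 → ∀ a b, mget M' a b =
        if a = 0 ∧ b = j then 0 else if a = i ∧ b = 0 then 0 else mget M a b := by
      intro hz a b
      rw [hM', if_pos (hcondM.mpr hz), mget_msetz, mget_msetz]
      have hb1 : 0 < (msetz M i 0).length := by rw [(shapeEq_msetz M i 0).1, hsh.1]; exact h0
      have hb2 : j < ((msetz M i 0).getD 0 []).length := by
        rw [(shapeEq_msetz M i 0).2 0, hsh.2 0]; exact hjn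
      have hb3 : i < M.length := by rw [hsh.1]; exact him
      have hb4 : 0 < (M.getD i []).length := by rw [hsh.2 i]; exact hri
      simp only [hb1, hb2, hb3, hb4, and_true]
    have hM'eq : mget M0 i j ≠ 0 → M' = M := by
      intro hnz
      rw [hM', if_neg (fun h => hnz (hcondM.mp h))]
    have hint' : ∀ a b, 1 ≤ a → 1 ≤ b → mget M' a b = mget M0 a b := by
      intro a b ha hb
      by_cases hz : mget M0 i j = 0
      · rw [hM'val hz, if_neg (by omega), if_neg (by omega)]
        exact hint a b ha hb
      · rw [hM'eq hz]; exact hint a b ha hb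
    rw [ih M' (shapeEq_trans hsh' hsh) (fun x hx => hLJ x (List.mem_cons_of_mem _ hx)) hint']
    by_cases hz : mget M0 i j = 0
    · rw [hM'val hz a b]
      by_cases hA : a = i ∧ b = 0
      · rw [if_pos (show a = i ∧ b = 0 ∧ ∃ j' ∈ j :: LJ, mget M0 i j' = 0 from
          ⟨hA.1, hA.2, j, List.mem_cons_self, hz⟩)]
        by_cases hex : ∃ j' ∈ LJ, mget M0 i j' = 0
        · rw [if_pos ⟨hA.1, hA.2, hex⟩]
        · rw [if_neg (show ¬(a = i ∧ b = 0 ∧ ∃ j' ∈ LJ, mget M0 i j' = 0) from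
              fun h => hex h.2.2),
            if_neg (show ¬(a = 0 ∧ b ∈ LJ ∧ mget M0 i b = 0) from by intro h; omega),
            if_neg (show ¬(a = 0 ∧ b = j) from by intro h; omega), if_pos hA]
      · rw [if_neg (show ¬(a = i ∧ b = 0 ∧ ∃ j' ∈ LJ, mget M0 i j' = 0) from
            fun h => hA ⟨h.1, h.2.1⟩),
          if_neg (show ¬(a = i ∧ b = 0 ∧ ∃ j' ∈ j :: LJ, mget M0 i j' = 0) from
            fun h => hA ⟨h.1, h.2.1⟩)]
        by_cases hB : a = 0 ∧ b = j
        · rw [if_pos (show a = 0 ∧ b ∈ j :: LJ ∧ mget M0 i b = 0 from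
            ⟨hB.1, List.mem_cons.mpr (Or.inl hB.2), hB.2 ▸ hz⟩)]
          by_cases hC2L : a = 0 ∧ b ∈ LJ ∧ mget M0 i b = 0
          · rw [if_pos hC2L]
          · rw [if_neg hC2L, if_pos hB]
        · by_cases hC2L : a = 0 ∧ b ∈ LJ ∧ mget M0 i b = 0
          · rw [if_pos hC2L,
              if_pos ⟨hC2L.1, List.mem_cons_of_mem _ hC2L.2.1, hC2L.2.2⟩]
          · rw [if_neg hC2L, if_neg hB, if_neg hA,
              if_neg (show ¬(a = 0 ∧ b ∈ j :: LJ ∧ mget M0 i b = 0) from by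
                intro h
                rcases List.mem_cons.mp h.2.1 with h1 | h1
                · exact hB ⟨h.1, h1⟩
                · exact hC2L ⟨h.1, h1, h.2.2⟩)]
    · rw [hM'eq hz]
      have e1 : (a = i ∧ b = 0 ∧ ∃ j' ∈ j :: LJ, mget M0 i j' = 0) ↔
          (a = i ∧ b = 0 ∧ ∃ j' ∈ LJ, mget M0 i j' = 0) := by
        constructor
        · rintro ⟨h1, h2, j', hj', hzz⟩
          rcases List.mem_cons.mp hj' with h3 | h3
          · exact absurd (h3 ▸ hzz) hz
          · exact ⟨h1, h2, j', h3, hzz⟩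
        · rintro ⟨h1, h2, j', hj', hzz⟩
          exact ⟨h1, h2, j', List.mem_cons_of_mem _ hj', hzz⟩
      have e2 : (a = 0 ∧ b ∈ j :: LJ ∧ mget M0 i b = 0) ↔
          (a = 0 ∧ b ∈ LJ ∧ mget M0 i b = 0) := by
        constructor
        · rintro ⟨h1, hm, hzz⟩
          rcases List.mem_cons.mp hm with h3 | h3
          · exact absurd (h3 ▸ hzz) hz
          · exact ⟨h1, h3, hzz⟩
        · rintro ⟨h1, hm, hzz⟩
          exact ⟨h1, List.mem_cons_of_mem _ hm, hzz⟩
      simp only [e1, e2]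

lemma shapeEq_phase1_step (M0 : List (List Int)) (i : Nat) (M : List (List Int)) :
    shapeEq ((List.range' 1 ((M0.getD 0 []).length - 1)).foldl
      (fun M j => if mget M i j == 0 then msetz (msetz M i 0) 0 j else M) M) M := by
  refine shapeEq_foldl _ _ (fun M j => ?_) M
  split
  · exact shapeEq_trans (shapeEq_msetz _ 0 j) (shapeEq_msetz M i 0)
  · exact shapeEq_refl M

lemma phase1_fold (M0 : List (List Int)) (LI : List Nat) (M : List (List Int))
    (hsh : shapeEq M M0) (h0 : 0 < M0.length)
    (hLI : ∀ i ∈ LI, 1 ≤ i ∧ i < M0.length)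
    (hrows : ∀ i, i < M0.length → 0 < (M0.getD i []).length)
    (hint : ∀ a b, 1 ≤ a → 1 ≤ b → mget M a b = mget M0 a b) (a b : Nat) :
    mget (LI.foldl (fun M i =>
        (List.range' 1 ((M0.getD 0 []).length - 1)).foldl
          (fun M j => if mget M i j == 0 then msetz (msetz M i 0) 0 j else M) M) M) a b =
      if a ∈ LI ∧ b = 0 ∧ ∃ j < (M0.getD 0 []).length, 1 ≤ j ∧ mget M0 a j = 0 then 0
      else if a = 0 ∧ 1 ≤ b ∧ b < (M0.getD 0 []).length ∧ ∃ i ∈ LI, mget M0 i b = 0 then 0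
      else mget M a b := by
  have hn0 : 0 < (M0.getD 0 []).length := hrows 0 h0
  have hmemLJ : ∀ x, x ∈ List.range' 1 ((M0.getD 0 []).length - 1) ↔
      1 ≤ x ∧ x < (M0.getD 0 []).length := by
    intro x; rw [List.mem_range'_1]; omega
  induction LI generalizing M with
  | nil => simp
  | cons i LI ih =>
    rw [List.foldl_cons]
    obtain ⟨hi1, him⟩ := hLI i List.mem_cons_self
    have hrow := phase1_row M0 i (List.range' 1 ((M0.getD 0 []).length - 1)) M hsh hi1 him h0
      (hrows i him) (fun j hj => (hmemLJ j).mp hj) hint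
    have hsh' : shapeEq ((List.range' 1 ((M0.getD 0 []).length - 1)).foldl
        (fun M j => if mget M i j == 0 then msetz (msetz M i 0) 0 j else M) M) M0 :=
      shapeEq_trans (shapeEq_phase1_step M0 i M) hsh
    have hint' : ∀ a b, 1 ≤ a → 1 ≤ b →
        mget ((List.range' 1 ((M0.getD 0 []).length - 1)).foldl
          (fun M j => if mget M i j == 0 then msetz (msetz M i 0) 0 j else M) M) a b =
        mget M0 a b := by
      intro a b ha hb
      rw [hrow a b, if_neg (by omega), if_neg (by omega)]
      exact hint a b ha hb
    rw [ih _ hsh' (fun x hx => hLI x (List.mem_cons_of_mem _ hx)) hint', hrow a b]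
    clear ih hrow hint' hint hsh hsh'
    by_cases hb0 : b = 0
    · subst hb0
      rw [if_neg (show ¬(a = 0 ∧ 1 ≤ 0 ∧ (0:Nat) < (M0.getD 0 []).length ∧
            ∃ i' ∈ LI, mget M0 i' 0 = 0) from by intro h; omega),
        if_neg (show ¬(a = 0 ∧ (0:Nat) ∈ List.range' 1 ((M0.getD 0 []).length - 1) ∧
            mget M0 i 0 = 0) from by intro h; have := (hmemLJ 0).mp h.2.1; omega),
        if_neg (show ¬(a = 0 ∧ 1 ≤ 0 ∧ (0:Nat) < (M0.getD 0 []).length ∧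
            ∃ i' ∈ i :: LI, mget M0 i' 0 = 0) from by intro h; omega)]
      by_cases hEa : ∃ j < (M0.getD 0 []).length, 1 ≤ j ∧ mget M0 a j = 0
      · by_cases haL : a ∈ LI
        · rw [if_pos ⟨haL, rfl, hEa⟩, if_pos ⟨List.mem_cons_of_mem _ haL, rfl, hEa⟩]
        · rw [if_neg (show ¬(a ∈ LI ∧ (0:Nat) = 0 ∧ ∃ j < (M0.getD 0 []).length,
              1 ≤ j ∧ mget M0 a j = 0) from fun h => haL h.1)]
          by_cases hai : a = i
          · rw [if_pos (show a = i ∧ (0:Nat) = 0 ∧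
                ∃ j ∈ List.range' 1 ((M0.getD 0 []).length - 1), mget M0 i j = 0 from
                ⟨hai, rfl, by
                  obtain ⟨j, hjn, hj1, hz⟩ := hEa
                  exact ⟨j, (hmemLJ j).mpr ⟨hj1, hjn⟩, by rw [← hai]; exact hz⟩⟩),
              if_pos ⟨List.mem_cons.mpr (Or.inl hai), rfl, hEa⟩]
          · rw [if_neg (show ¬(a = i ∧ (0:Nat) = 0 ∧
                ∃ j ∈ List.range' 1 ((M0.getD 0 []).length - 1), mget M0 i j = 0) from
                fun h => hai h.1),
              if_neg (show ¬(a ∈ i :: LI ∧ (0:Nat) = 0 ∧ ∃ j < (M0.getD 0 []).length,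
                1 ≤ j ∧ mget M0 a j = 0) from by
                intro h
                rcases List.mem_cons.mp h.1 with h1 | h1
                · exact hai h1
                · exact haL h1)]
      · rw [if_neg (show ¬(a ∈ LI ∧ (0:Nat) = 0 ∧ ∃ j < (M0.getD 0 []).length,
            1 ≤ j ∧ mget M0 a j = 0) from fun h => hEa h.2.2),
          if_neg (show ¬(a = i ∧ (0:Nat) = 0 ∧
            ∃ j ∈ List.range' 1 ((M0.getD 0 []).length - 1), mget M0 i j = 0) from by
            intro h
            obtain ⟨j, hj, hz⟩ := h.2.2
            have hm := (hmemLJ j).mp hj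
            exact hEa ⟨j, hm.2, hm.1, by rw [h.1]; exact hz⟩),
          if_neg (show ¬(a ∈ i :: LI ∧ (0:Nat) = 0 ∧ ∃ j < (M0.getD 0 []).length,
            1 ≤ j ∧ mget M0 a j = 0) from fun h => hEa h.2.2)]
    · rw [if_neg (show ¬(a ∈ LI ∧ b = 0 ∧ ∃ j < (M0.getD 0 []).length,
          1 ≤ j ∧ mget M0 a j = 0) from fun h => hb0 h.2.1),
        if_neg (show ¬(a = i ∧ b = 0 ∧
          ∃ j ∈ List.range' 1 ((M0.getD 0 []).length - 1), mget M0 i j = 0) from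
          fun h => hb0 h.2.1),
        if_neg (show ¬(a ∈ i :: LI ∧ b = 0 ∧ ∃ j < (M0.getD 0 []).length,
          1 ≤ j ∧ mget M0 a j = 0) from fun h => hb0 h.2.1)]
      by_cases hA : a = 0 ∧ 1 ≤ b ∧ b < (M0.getD 0 []).length
      · by_cases hex : ∃ i' ∈ LI, mget M0 i' b = 0
        · rw [if_pos ⟨hA.1, hA.2.1, hA.2.2, hex⟩,
            if_pos ⟨hA.1, hA.2.1, hA.2.2, by
              obtain ⟨i', hi', hz⟩ := hex
              exact ⟨i', List.mem_cons_of_mem _ hi', hz⟩⟩]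
        · rw [if_neg (show ¬(a = 0 ∧ 1 ≤ b ∧ b < (M0.getD 0 []).length ∧
              ∃ i' ∈ LI, mget M0 i' b = 0) from fun h => hex h.2.2.2)]
          by_cases hzi : mget M0 i b = 0
          · rw [if_pos (show a = 0 ∧ b ∈ List.range' 1 ((M0.getD 0 []).length - 1) ∧
                mget M0 i b = 0 from ⟨hA.1, (hmemLJ b).mpr ⟨hA.2.1, hA.2.2⟩, hzi⟩),
              if_pos ⟨hA.1, hA.2.1, hA.2.2, i, List.mem_cons_self, hzi⟩]
          · rw [if_neg (show ¬(a = 0 ∧ b ∈ List.range' 1 ((M0.getD 0 []).length - 1) ∧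
                mget M0 i b = 0) from fun h => hzi h.2.2),
              if_neg (show ¬(a = 0 ∧ 1 ≤ b ∧ b < (M0.getD 0 []).length ∧
                ∃ i' ∈ i :: LI, mget M0 i' b = 0) from by
                intro h
                obtain ⟨i', hi', hz⟩ := h.2.2.2
                rcases List.mem_cons.mp hi' with h1 | h1
                · exact hzi (by rw [← h1]; exact hz)
                · exact hex ⟨i', h1, hz⟩)]
      · rw [if_neg (show ¬(a = 0 ∧ 1 ≤ b ∧ b < (M0.getD 0 []).length ∧
            ∃ i' ∈ LI, mget M0 i' b = 0) from fun h => hA ⟨h.1, h.2.1, h.2.2.1⟩),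
          if_neg (show ¬(a = 0 ∧ b ∈ List.range' 1 ((M0.getD 0 []).length - 1) ∧
            mget M0 i b = 0) from by
            intro h
            have := (hmemLJ b).mp h.2.1
            exact hA ⟨h.1, this.1, this.2⟩),
          if_neg (show ¬(a = 0 ∧ 1 ≤ b ∧ b < (M0.getD 0 []).length ∧
            ∃ i' ∈ i :: LI, mget M0 i' b = 0) from fun h => hA ⟨h.1, h.2.1, h.2.2.1⟩)]


abbrev zr (M : List (List Int)) (n i : Nat) : Prop := ∃ j < n, mget M i j = 0
abbrev zc (M : List (List Int)) (j : Nat) : Prop := ∃ i < M.length, mget M i j = 0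


lemma A_char (M : List (List Int)) (hne : M ≠ []) (hn0 : 0 < (M.getD 0 []).length)
    (hrows : ∀ row ∈ M, (M.getD 0 []).length ≤ row.length) (a b : Nat) :
    mget (set_matrix_zeroes M) a b =
      if a < M.length ∧ b < (M.getD 0 []).length ∧ (zr M (M.getD 0 []).length a ∨ zc M b)
      then 0 else mget M a b := by
  have h0m : 0 < M.length := List.length_pos_iff.mpr hne
  have hrowlen : ∀ i, i < M.length → (M.getD 0 []).length ≤ (M.getD i []).length := by
    intro i hi
    refine hrows _ ?_
    rw [List.getD_eq_getElem?_getD, List.getElem?_eq_getElem hi]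
    exact List.getElem_mem _
  have hrows0 : ∀ i, i < M.length → 0 < (M.getD i []).length :=
    fun i hi => lt_of_lt_of_le hn0 (hrowlen i hi)
  have hmem1 : ∀ x, x ∈ List.range' 1 (M.length - 1) ↔ 1 ≤ x ∧ x < M.length :=
    fun x => by rw [List.mem_range'_1]; omega
  have hmem2 : ∀ x, x ∈ List.range' 1 ((M.getD 0 []).length - 1) ↔
      1 ≤ x ∧ x < (M.getD 0 []).length :=
    fun x => by rw [List.mem_range'_1]; omega
  simp only [set_matrix_zeroes]
  set M1 := (List.range' 1 (M.length - 1)).foldl (fun Macc i =>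
      (List.range' 1 ((M.getD 0 []).length - 1)).foldl (fun Mx j =>
        if mget Mx i j == 0 then msetz (msetz Mx i 0) 0 j else Mx) Macc) M with hM1
  set M2 := (List.range' 1 (M.length - 1)).foldl (fun Mx i =>
      if mget Mx i 0 == 0 then
        (List.range (M.getD 0 []).length).foldl (fun My j => msetz My i j) Mx else Mx) M1 with hM2
  set M3 := (List.range' 1 ((M.getD 0 []).length - 1)).foldl (fun Mx j =>
      if mget Mx 0 j == 0 then
        (List.range M.length).foldl (fun My i => msetz My i j) Mx else Mx) M2 with hM3
  have h1 := fun x y => phase1_fold M (List.range' 1 (M.length - 1)) M (shapeEq_refl M) h0m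
      (fun i hi => (hmem1 i).mp hi) hrows0 (fun _ _ _ _ => rfl) x y
  simp only [← hM1] at h1
  have sh1 : shapeEq M1 M := by
    rw [hM1]; exact shapeEq_foldl _ _ (fun Mx i => shapeEq_phase1_step M i Mx) M
  have h2 : ∀ x y, mget M2 x y =
      if x ∈ List.range' 1 (M.length - 1) ∧ mget M1 x 0 = 0 ∧ y < (M.getD 0 []).length then 0
      else mget M1 x y := by
    intro x y
    rw [hM2]
    exact phase2_fold _ _ M1 (fun i hi => by rw [sh1.1]; exact ((hmem1 i).mp hi).2)
      (fun i hi => by rw [sh1.2 i]; exact hrowlen i ((hmem1 i).mp hi).2) x y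
  have sh2 : shapeEq M2 M := by
    rw [hM2]
    refine shapeEq_trans (shapeEq_foldl _ _ (fun Mx i => ?_) M1) sh1
    split
    · exact shapeEq_foldl _ _ (fun My j => shapeEq_msetz My i j) Mx
    · exact shapeEq_refl Mx
  have h3 : ∀ x y, mget M3 x y =
      if y ∈ List.range' 1 ((M.getD 0 []).length - 1) ∧ mget M2 0 y = 0 ∧ x < M.length then 0
      else mget M2 x y := by
    intro x y
    rw [hM3]
    exact phase3_fold M.length _ M2 sh2.1.symm (fun j hj i hi => by
      rw [sh2.2 i]
      exact lt_of_lt_of_le ((hmem2 j).mp hj).2 (hrowlen i (by rw [← sh2.1]; exact hi))) x y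
  have sh3 : shapeEq M3 M := by
    rw [hM3]
    refine shapeEq_trans (shapeEq_foldl _ _ (fun Mx j => ?_) M2) sh2
    split
    · exact shapeEq_foldl _ _ (fun My i => shapeEq_msetz My i j) Mx
    · exact shapeEq_refl Mx
  have hfr : (((List.range (M.getD 0 []).length).any fun j => mget M 0 j == 0) = true) ↔
      zr M (M.getD 0 []).length 0 := by
    simp [List.any_eq_true, List.mem_range]
  have hfc : (((List.range M.length).any fun i => mget M i 0 == 0) = true) ↔ zc M 0 := by
    simp [List.any_eq_true, List.mem_range]
  set M4 := if ((List.range (M.getD 0 []).length).any fun j => mget M 0 j == 0) = true then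
      (List.range (M.getD 0 []).length).foldl (fun Mx j => msetz Mx 0 j) M3 else M3 with hM4
  have sh4 : shapeEq M4 M := by
    rw [hM4]; split
    · exact shapeEq_trans (shapeEq_foldl _ _ (fun Mx j => shapeEq_msetz Mx 0 j) M3) sh3
    · exact sh3
  have h4 : ∀ x y, mget M4 x y =
      if zr M (M.getD 0 []).length 0 ∧ x = 0 ∧ y < (M.getD 0 []).length then 0
      else mget M3 x y := by
    intro x y
    rw [hM4]
    by_cases hR0 : zr M (M.getD 0 []).length 0
    · rw [if_pos (hfr.mpr hR0),
        show (List.range (M.getD 0 []).length).foldl (fun Mx j => msetz Mx 0 j) M3 =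
          ((List.range (M.getD 0 []).length).map (Prod.mk 0)).foldl
            (fun Mx p => msetz Mx p.1 p.2) M3 from by rw [List.foldl_map],
        mget_foldl_msetz _ _ (fun p hp => by
          rcases List.mem_map.mp hp with ⟨j, hj, rfl⟩
          exact ⟨by rw [sh3.1]; exact h0m, by rw [sh3.2 0]; exact List.mem_range.mp hj⟩)]
      simp only [mem_ps_row, hR0, true_and]
    · rw [if_neg (fun h => hR0 (hfr.mp h)),
        if_neg (fun h => hR0 h.1)]
  have h5 : mget (if ((List.range M.length).any fun i => mget M i 0 == 0) = true then
      (List.range M.length).foldl (fun Mx i => msetz Mx i 0) M4 else M4) a b =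
      if zc M 0 ∧ b = 0 ∧ a < M.length then 0 else mget M4 a b := by
    by_cases hC0 : zc M 0
    · rw [if_pos (hfc.mpr hC0),
        show (List.range M.length).foldl (fun Mx i => msetz Mx i 0) M4 =
          ((List.range M.length).map (fun i => (i, 0))).foldl
            (fun Mx p => msetz Mx p.1 p.2) M4 from by rw [List.foldl_map],
        mget_foldl_msetz _ _ (fun p hp => by
          rcases List.mem_map.mp hp with ⟨i, hi, rfl⟩
          have him : i < M.length := List.mem_range.mp hi
          exact ⟨by rw [sh4.1]; exact him, by rw [sh4.2 i]; exact hrows0 i him⟩)]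
      simp only [mem_ps_col, hC0, true_and]
    · rw [if_neg (fun h => hC0 (hfc.mp h)), if_neg (fun h => hC0 h.1)]
  have hM20 : ∀ y, mget M2 0 y = mget M1 0 y := fun y => by
    rw [h2 0 y, if_neg (by intro h; have := (hmem1 0).mp h.1; omega)]
  have hM1int : ∀ x y, 1 ≤ x → 1 ≤ y → mget M1 x y = mget M x y := by
    intro x y hx hy
    rw [h1 x y, if_neg (by intro h; omega), if_neg (by intro h; omega)]
  have hM1out : ∀ x y, M.length ≤ x ∨ (M.getD 0 []).length ≤ y → mget M1 x y = mget M x y := by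
    intro x y hxy
    rw [h1 x y, if_neg (by intro h; have := (hmem1 x).mp h.1; omega),
      if_neg (by intro h; omega)]
  have hEzr : ∀ x, (∃ j < (M.getD 0 []).length, 1 ≤ j ∧ mget M x j = 0) →
      zr M (M.getD 0 []).length x := by
    rintro x ⟨j, hj, _, hz⟩; exact ⟨j, hj, hz⟩
  have hM10 : ∀ y, 1 ≤ y → y < (M.getD 0 []).length → (mget M1 0 y = 0 ↔ zc M y) := by
    intro y hy1 hyn
    rw [h1 0 y, if_neg (by intro h; have := (hmem1 0).mp h.1; omega)]
    by_cases hEL : ∃ i ∈ List.range' 1 (M.length - 1), mget M i y = 0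
    · rw [if_pos ⟨rfl, hy1, hyn, hEL⟩]
      exact ⟨fun _ => by
        obtain ⟨i, hi, hz⟩ := hEL
        exact ⟨i, ((hmem1 i).mp hi).2, hz⟩, fun _ => rfl⟩
    · rw [if_neg (fun h => hEL h.2.2.2)]
      constructor
      · intro hz; exact ⟨0, h0m, hz⟩
      · rintro ⟨i, him, hz⟩
        rcases Nat.eq_zero_or_pos i with h1' | h1'
        · rw [← h1']; exact hz
        · exact absurd ⟨i, (hmem1 i).mpr ⟨h1', him⟩, hz⟩ hEL
  have hM1a0 : ∀ x, 1 ≤ x → x < M.length →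
      (mget M1 x 0 = 0 ↔ zr M (M.getD 0 []).length x) := by
    intro x hx1 hxm
    rw [h1 x 0]
    by_cases hE : ∃ j < (M.getD 0 []).length, 1 ≤ j ∧ mget M x j = 0
    · rw [if_pos ⟨(hmem1 x).mpr ⟨hx1, hxm⟩, rfl, hE⟩]
      exact ⟨fun _ => hEzr x hE, fun _ => rfl⟩
    · rw [if_neg (fun h => hE h.2.2), if_neg (by intro h; omega)]
      constructor
      · intro hz; exact ⟨0, hn0, hz⟩
      · rintro ⟨j, hjn, hz⟩
        rcases Nat.eq_zero_or_pos j with h1' | h1'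
        · rw [← h1']; exact hz
        · exact absurd ⟨j, hjn, h1', hz⟩ hE
  rw [h5, h4 a b, h3 a b]
  by_cases ha : a < M.length
  · by_cases hb : b < (M.getD 0 []).length
    · by_cases hbz : b = 0
      · by_cases hC0 : zc M 0
        · rw [if_pos ⟨hC0, hbz, ha⟩, if_pos ⟨ha, hb, Or.inr (by rw [hbz]; exact hC0)⟩]
        · rw [if_neg (fun h => hC0 h.1)]
          by_cases haz : a = 0
          · by_cases hR0 : zr M (M.getD 0 []).length 0
            · rw [if_pos ⟨hR0, haz, hb⟩, if_pos ⟨ha, hb, Or.inl (by rw [haz]; exact hR0)⟩]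
            · rw [if_neg (fun h => hR0 h.1),
                if_neg (show ¬(b ∈ List.range' 1 ((M.getD 0 []).length - 1) ∧
                    mget M2 0 b = 0 ∧ a < M.length) from by
                  intro h; have := (hmem2 b).mp h.1; omega),
                h2 a b,
                if_neg (show ¬(a ∈ List.range' 1 (M.length - 1) ∧ mget M1 a 0 = 0 ∧
                    b < (M.getD 0 []).length) from by
                  intro h; have := (hmem1 a).mp h.1; omega),
                h1 a b,
                if_neg (by intro h; have := (hmem1 a).mp h.1; omega),
                if_neg (by intro h; omega),
                if_neg (show ¬(a < M.length ∧ b < (M.getD 0 []).length ∧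
                    (zr M (M.getD 0 []).length a ∨ zc M b)) from by
                  intro h
                  rcases h.2.2 with hz | hz
                  · exact hR0 (haz ▸ hz)
                  · exact hC0 (by rw [← hbz]; exact hz))]
          · have ha1 : 1 ≤ a := Nat.one_le_iff_ne_zero.mpr haz
            rw [if_neg (show ¬(zr M (M.getD 0 []).length 0 ∧ a = 0 ∧
                  b < (M.getD 0 []).length) from fun h => haz h.2.1),
              if_neg (show ¬(b ∈ List.range' 1 ((M.getD 0 []).length - 1) ∧
                  mget M2 0 b = 0 ∧ a < M.length) from by
                intro h; have := (hmem2 b).mp h.1; omega),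
              h2 a b]
            by_cases hRa : zr M (M.getD 0 []).length a
            · rw [if_pos ⟨(hmem1 a).mpr ⟨ha1, ha⟩, (hM1a0 a ha1 ha).mpr hRa, hb⟩,
                if_pos ⟨ha, hb, Or.inl hRa⟩]
            · rw [if_neg (show ¬(a ∈ List.range' 1 (M.length - 1) ∧ mget M1 a 0 = 0 ∧
                    b < (M.getD 0 []).length) from
                  fun h => hRa ((hM1a0 a ha1 ha).mp h.2.1)),
                h1 a b,
                if_neg (show ¬(a ∈ List.range' 1 (M.length - 1) ∧ b = 0 ∧
                    ∃ j < (M.getD 0 []).length, 1 ≤ j ∧ mget M a j = 0) from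
                  fun h => hRa (hEzr a h.2.2)),
                if_neg (fun h => haz h.1),
                if_neg (show ¬(a < M.length ∧ b < (M.getD 0 []).length ∧
                    (zr M (M.getD 0 []).length a ∨ zc M b)) from by
                  intro h
                  rcases h.2.2 with hz | hz
                  · exact hRa hz
                  · exact hC0 (by rw [← hbz]; exact hz))]
      · have hb1 : 1 ≤ b := Nat.one_le_iff_ne_zero.mpr hbz
        rw [if_neg (fun h => hbz h.2.1)]
        by_cases haz : a = 0
        · by_cases hR0 : zr M (M.getD 0 []).length 0
          · rw [if_pos ⟨hR0, haz, hb⟩, if_pos ⟨ha, hb, Or.inl (by rw [haz]; exact hR0)⟩]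
          · rw [if_neg (fun h => hR0 h.1)]
            by_cases hCb : zc M b
            · rw [if_pos ⟨(hmem2 b).mpr ⟨hb1, hb⟩,
                  by rw [hM20 b]; exact (hM10 b hb1 hb).mpr hCb, ha⟩,
                if_pos ⟨ha, hb, Or.inr hCb⟩]
            · rw [if_neg (show ¬(b ∈ List.range' 1 ((M.getD 0 []).length - 1) ∧
                    mget M2 0 b = 0 ∧ a < M.length) from by
                  intro h
                  exact hCb ((hM10 b hb1 hb).mp (by rw [← hM20 b]; exact h.2.1))),
                h2 a b,
                if_neg (show ¬(a ∈ List.range' 1 (M.length - 1) ∧ mget M1 a 0 = 0 ∧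
                    b < (M.getD 0 []).length) from by
                  intro h; have := (hmem1 a).mp h.1; omega),
                h1 a b,
                if_neg (by intro h; have := (hmem1 a).mp h.1; omega),
                if_neg (show ¬(a = 0 ∧ 1 ≤ b ∧ b < (M.getD 0 []).length ∧
                    ∃ i ∈ List.range' 1 (M.length - 1), mget M i b = 0) from by
                  intro h
                  obtain ⟨i, hi, hz⟩ := h.2.2.2
                  exact hCb ⟨i, ((hmem1 i).mp hi).2, hz⟩),
                if_neg (show ¬(a < M.length ∧ b < (M.getD 0 []).length ∧
                    (zr M (M.getD 0 []).length a ∨ zc M b)) from by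
                  intro h
                  rcases h.2.2 with hz | hz
                  · exact hR0 (haz ▸ hz)
                  · exact hCb hz)]
        · have ha1 : 1 ≤ a := Nat.one_le_iff_ne_zero.mpr haz
          rw [if_neg (fun h => haz h.2.1)]
          by_cases hCb : zc M b
          · rw [if_pos ⟨(hmem2 b).mpr ⟨hb1, hb⟩,
                by rw [hM20 b]; exact (hM10 b hb1 hb).mpr hCb, ha⟩,
              if_pos ⟨ha, hb, Or.inr hCb⟩]
          · rw [if_neg (show ¬(b ∈ List.range' 1 ((M.getD 0 []).length - 1) ∧
                  mget M2 0 b = 0 ∧ a < M.length) from by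
                intro h
                exact hCb ((hM10 b hb1 hb).mp (by rw [← hM20 b]; exact h.2.1))),
              h2 a b]
            by_cases hRa : zr M (M.getD 0 []).length a
            · rw [if_pos ⟨(hmem1 a).mpr ⟨ha1, ha⟩, (hM1a0 a ha1 ha).mpr hRa, hb⟩,
                if_pos ⟨ha, hb, Or.inl hRa⟩]
            · rw [if_neg (show ¬(a ∈ List.range' 1 (M.length - 1) ∧ mget M1 a 0 = 0 ∧
                    b < (M.getD 0 []).length) from
                  fun h => hRa ((hM1a0 a ha1 ha).mp h.2.1)),
                hM1int a b ha1 hb1,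
                if_neg (show ¬(a < M.length ∧ b < (M.getD 0 []).length ∧
                    (zr M (M.getD 0 []).length a ∨ zc M b)) from by
                  intro h
                  rcases h.2.2 with hz | hz
                  · exact hRa hz
                  · exact hCb hz)]
    · rw [if_neg (by intro h; omega),
        if_neg (by intro h; omega),
        if_neg (show ¬(b ∈ List.range' 1 ((M.getD 0 []).length - 1) ∧
            mget M2 0 b = 0 ∧ a < M.length) from by
          intro h; have := (hmem2 b).mp h.1; omega),
        h2 a b,
        if_neg (show ¬(a ∈ List.range' 1 (M.length - 1) ∧ mget M1 a 0 = 0 ∧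
            b < (M.getD 0 []).length) from fun h => hb h.2.2),
        hM1out a b (Or.inr (by omega)),
        if_neg (fun h => hb h.2.1)]
  · rw [if_neg (fun h => ha h.2.2),
      if_neg (by intro h; omega),
      if_neg (fun h => ha h.2.2),
      h2 a b,
      if_neg (show ¬(a ∈ List.range' 1 (M.length - 1) ∧ mget M1 a 0 = 0 ∧
          b < (M.getD 0 []).length) from by
        intro h; have := (hmem1 a).mp h.1; omega),
      hM1out a b (Or.inl (by omega)),
      if_neg (fun h => ha h.1)]



lemma mget_out (X : List (List Int)) (a b : Nat) (h : X.length ≤ a) : mget X a b = 0 := by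
  rw [mget, List.getD_eq_default _ _ h]
  simp

lemma eq_of_shape_mget (A B : List (List Int)) (hl : A.length = B.length)
    (hr : ∀ i, (A.getD i []).length = (B.getD i []).length)
    (h : ∀ i j, mget A i j = mget B i j) : A = B := by
  apply List.ext_getElem hl
  intro i h1 h2
  apply List.ext_getElem
  · have := hr i
    rwa [List.getD_eq_getElem _ _ h1, List.getD_eq_getElem _ _ h2] at this
  · intro j hj1 hj2
    have := h i j
    rw [mget, mget, List.getD_eq_getElem _ _ h1, List.getD_eq_getElem _ _ h2,
      List.getD_eq_getElem _ _ hj1, List.getD_eq_getElem _ _ hj2] at this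
    exact this

lemma B_char (M : List (List Int)) (hne : M ≠ [])
    (hrows : ∀ row ∈ M, (M.getD 0 []).length ≤ row.length) (a b : Nat) :
    mget (set_matrix_zeroes_alt M) a b =
      if a < M.length ∧ b < (M.getD 0 []).length ∧ (zr M (M.getD 0 []).length a ∨ zc M b)
      then 0 else mget M a b := by
  have h0m : 0 < M.length := List.length_pos_iff.mpr hne
  have hrowlen : ∀ i, i < M.length → (M.getD 0 []).length ≤ (M.getD i []).length := by
    intro i hi
    refine hrows _ ?_
    rw [List.getD_eq_getElem?_getD, List.getElem?_eq_getElem hi]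
    exact List.getElem_mem _
  have htake : ∀ (i : Nat) (hi : i < M.length),
      ((List.take (M.getD 0 []).length (M[i]'hi)).contains (0 : Int) = true) ↔
        zr M (M.getD 0 []).length i := by
    intro i hi
    have hlen : (M.getD 0 []).length ≤ (M[i]'hi).length := by
      rw [← List.getD_eq_getElem M [] hi]; exact hrowlen i hi
    rw [List.contains_iff_mem, List.mem_iff_getElem]
    constructor
    · rintro ⟨j, hj, hjz⟩
      have hjn : j < (M.getD 0 []).length := by simp at hj; exact hj.1
      refine ⟨j, hjn, ?_⟩
      rw [mget, List.getD_eq_getElem M [] hi,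
        List.getD_eq_getElem _ _ (lt_of_lt_of_le hjn hlen), ← hjz]
      simp [List.getElem_take]
    · rintro ⟨j, hjn, hz⟩
      refine ⟨j, by simpa using ⟨hjn, lt_of_lt_of_le hjn hlen⟩, ?_⟩
      rw [List.getElem_take]
      rw [mget, List.getD_eq_getElem M [] hi,
        List.getD_eq_getElem _ _ (lt_of_lt_of_le hjn hlen)] at hz
      exact hz
  simp only [set_matrix_zeroes_alt]
  set rowsS := PySem.Set.ofList (((PySem.List.enumerate M 0).filter
      (fun p => (p.2.take (M.getD 0 []).length).contains 0)).map Prod.fst) with hRS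
  set colsS := PySem.Set.ofList (((List.range (M.getD 0 []).length).filter
      (fun j => M.any (fun row => row.getD j 0 == 0))).map (fun (j : Nat) => (j : Int))) with hCS
  have hRows : ∀ x : Nat, (rowsS.contains (x : Int) = true) ↔
      (x < M.length ∧ zr M (M.getD 0 []).length x) := by
    intro x
    rw [hRS, PySem.Set.contains_iff, PySem.Set.mem_ofList]
    simp only [List.mem_map, List.mem_filter, PySem.List.mem_enumerate_iff]
    constructor
    · rintro ⟨p, ⟨⟨k, hk, rfl⟩, hp⟩, hfst⟩
      have hkx : k = x := by exact_mod_cast by simpa using hfst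
      subst hkx
      exact ⟨hk, (htake k hk).mp hp⟩
    · rintro ⟨hxm, hzr⟩
      exact ⟨((0 : Int) + x, M[x]'hxm), ⟨⟨x, hxm, rfl⟩, (htake x hxm).mpr hzr⟩, by simp⟩
  have hCols : ∀ x : Nat, (colsS.contains (x : Int) = true) ↔
      (x < (M.getD 0 []).length ∧ zc M x) := by
    intro x
    rw [hCS, PySem.Set.contains_iff, PySem.Set.mem_ofList]
    simp only [List.mem_map, List.mem_filter, List.mem_range, List.any_eq_true,
      beq_iff_eq, Nat.cast_inj]
    constructor
    · rintro ⟨j, ⟨hjn, hq⟩, rfl⟩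
      refine ⟨hjn, ?_⟩
      obtain ⟨row, hrowm, hz⟩ := hq
      obtain ⟨i, hi, rfl⟩ := List.mem_iff_getElem.mp hrowm
      exact ⟨i, hi, by rw [mget, List.getD_eq_getElem M [] hi]; exact hz⟩
    · rintro ⟨hxn, i, hi, hz⟩
      exact ⟨x, ⟨hxn, M[i]'hi, List.getElem_mem _, by
        rw [mget, List.getD_eq_getElem M [] hi] at hz; exact hz⟩, rfl⟩
  by_cases ha : a < M.length
  · have hget : (List.map (fun p => (List.range (M.getD 0 []).length).foldl
        (fun row (j : Nat) => if rowsS.contains p.1 || colsS.contains (j : Int)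
          then row.set j 0 else row) p.2) (PySem.List.enumerate M 0)).getD a [] =
        (List.range (M.getD 0 []).length).foldl
          (fun row (j : Nat) => if rowsS.contains ((a : Int)) || colsS.contains (j : Int)
            then row.set j 0 else row) (M[a]'ha) := by
      rw [List.getD_eq_getElem?_getD, List.getElem?_map, PySem.List.getElem?_enumerate,
        List.getElem?_eq_getElem ha]
      simp
    rw [mget, hget, getD_foldl_set_if]
    have hMa : (M[a]'ha).length = (M.getD a []).length := by
      rw [List.getD_eq_getElem M [] ha]
    have hMag : ∀ y : Nat, (M[a]'ha).getD y 0 = mget M a y := by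
      intro y; rw [mget, List.getD_eq_getElem M [] ha]
    by_cases hb : b < (M.getD 0 []).length
    · by_cases hor : zr M (M.getD 0 []).length a ∨ zc M b
      · rw [if_pos ⟨List.mem_range.mpr hb, by
            rcases hor with h | h
            · simp only [Bool.or_eq_true]; exact Or.inl ((hRows a).mpr ⟨ha, h⟩)
            · simp only [Bool.or_eq_true]; exact Or.inr ((hCols b).mpr ⟨hb, h⟩), by
            rw [hMa]; exact lt_of_lt_of_le hb (hrowlen a ha)⟩,
          if_pos ⟨ha, hb, hor⟩]
      · rw [if_neg (by
            intro h
            have hcb := h.2.1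
            simp only [Bool.or_eq_true] at hcb
            rcases hcb with hx | hx
            · exact hor (Or.inl ((hRows a).mp hx).2)
            · exact hor (Or.inr ((hCols b).mp hx).2)), hMag b,
          if_neg (fun h => hor h.2.2)]
    · rw [if_neg (fun h => hb (List.mem_range.mp h.1)), hMag b,
        if_neg (fun h => hb h.2.1)]
  · have hlen : (List.map (fun p => (List.range (M.getD 0 []).length).foldl
        (fun row (j : Nat) => if rowsS.contains p.1 || colsS.contains (j : Int)
          then row.set j 0 else row) p.2) (PySem.List.enumerate M 0)).length = M.length := by
      simp [PySem.List.length_enumerate]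
    rw [mget_out _ a b (by rw [hlen]; omega), if_neg (fun h => ha h.1),
      mget_out M a b (by omega)]


lemma shape_A (M : List (List Int)) : shapeEq (set_matrix_zeroes M) M := by
  simp only [set_matrix_zeroes]
  set M1 := (List.range' 1 (M.length - 1)).foldl (fun Macc i =>
      (List.range' 1 ((M.getD 0 []).length - 1)).foldl (fun Mx j =>
        if mget Mx i j == 0 then msetz (msetz Mx i 0) 0 j else Mx) Macc) M with hM1
  set M2 := (List.range' 1 (M.length - 1)).foldl (fun Mx i =>
      if mget Mx i 0 == 0 then
        (List.range (M.getD 0 []).length).foldl (fun My j => msetz My i j) Mx else Mx) M1 with hM2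
  set M3 := (List.range' 1 ((M.getD 0 []).length - 1)).foldl (fun Mx j =>
      if mget Mx 0 j == 0 then
        (List.range M.length).foldl (fun My i => msetz My i j) Mx else Mx) M2 with hM3
  have sh1 : shapeEq M1 M := by
    rw [hM1]; exact shapeEq_foldl _ _ (fun Mx i => shapeEq_phase1_step M i Mx) M
  have sh2 : shapeEq M2 M := by
    rw [hM2]
    refine shapeEq_trans (shapeEq_foldl _ _ (fun Mx i => ?_) M1) sh1
    split
    · exact shapeEq_foldl _ _ (fun My j => shapeEq_msetz My i j) Mx
    · exact shapeEq_refl Mx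
  have sh3 : shapeEq M3 M := by
    rw [hM3]
    refine shapeEq_trans (shapeEq_foldl _ _ (fun Mx j => ?_) M2) sh2
    split
    · exact shapeEq_foldl _ _ (fun My i => shapeEq_msetz My i j) Mx
    · exact shapeEq_refl Mx
  set M4 := if ((List.range (M.getD 0 []).length).any fun j => mget M 0 j == 0) = true then
      (List.range (M.getD 0 []).length).foldl (fun Mx j => msetz Mx 0 j) M3 else M3 with hM4
  have sh4 : shapeEq M4 M := by
    rw [hM4]; split
    · exact shapeEq_trans (shapeEq_foldl _ _ (fun Mx j => shapeEq_msetz Mx 0 j) M3) sh3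
    · exact sh3
  split
  · exact shapeEq_trans (shapeEq_foldl _ _ (fun Mx i => shapeEq_msetz Mx i 0) M4) sh4
  · exact sh4

lemma length_foldl_set_if (L : List Nat) (c : Nat → Bool) (row : List Int) :
    (L.foldl (fun r j => if c j then r.set j 0 else r) row).length = row.length := by
  induction L generalizing row with
  | nil => rfl
  | cons j L ih => simp only [List.foldl_cons]; split <;> simp [ih]

lemma shape_B (M : List (List Int)) : shapeEq (set_matrix_zeroes_alt M) M := by
  constructor
  · simp [set_matrix_zeroes_alt, PySem.List.length_enumerate]
  · intro i
    simp only [set_matrix_zeroes_alt]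
    by_cases hi : i < M.length
    · rw [List.getD_eq_getElem?_getD, List.getElem?_map, PySem.List.getElem?_enumerate,
        List.getElem?_eq_getElem hi]
      simp only [Option.map_some, Option.getD_some]
      rw [length_foldl_set_if, List.getD_eq_getElem M [] hi]
    · rw [List.getD_eq_default _ _ (by simp [PySem.List.length_enumerate]; omega),
        List.getD_eq_default _ _ (by omega)]


-- ===== VERDICT (by name: the statement is the Claim_ definition above) =====
theorem set_matrix_zeroes_spec : Claim_equal_set_matrix_zeroes := by
  intro M _ hpre
  obtain ⟨hne, hn0, hrows⟩ := hpre
  show set_matrix_zeroes M = set_matrix_zeroes_alt M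
  have hA := shape_A M
  have hB := shape_B M
  exact eq_of_shape_mget _ _ (hA.1.trans hB.1.symm) (fun i => (hA.2 i).trans (hB.2 i).symm)
    (fun i j => (A_char M hne hn0 hrows i j).trans (B_char M hne hrows i j).symm)
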